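-- pv_equiv track=rewrite | github.com/shinas07/career-path-recommendation | backend/careerpath/views.py | parse_certifications
-- ===== SOURCE A (Python) =====
-- def parse_certifications(text_content):
--     """Parse certifications from converted text to structured format."""
--     certifications = []
--     current_record = {}
--
--     for line in text_content.split('\n'):
--         if line.startswith('Record'):
--             if current_record:
--                 certifications.append(current_record)
--                 current_record = {}
--         elif ':' in line:
--             key, value = line.split(':', 1)
--             current_record[key.strip()] = value.strip()
--
--     if current_record:
--         certifications.append(current_record)
--
--     return certifications
-- ===== SOURCE B (Python) =====
-- def parse_certifications(text_content):
--     """Parse certifications from converted text to structured format."""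
--     # Phase 1: partition lines into blocks separated by 'Record' lines.
--     done, current = [], []
--     for line in text_content.split('\n'):
--         if line.startswith('Record'):
--             done.append(current)
--             current = []
--         else:
--             current.append(line)
--     blocks = done + [current]
--     # Phase 2: each block becomes a dict (last value wins on duplicate keys).
--     records = [{k.strip(): v.strip()
--                 for k, v in (l.split(':', 1) for l in block if ':' in l)}
--                for block in blocks]
--     # Phase 3: drop empty records.
--     return [r for r in records if r]
-- ===== Notes on version B (the rewrite author's own statement) =====
-- stated objective: alternative
-- what changed: Replaces A's single interleaved loop with mutable flush state by a three-phase pipeline: partition the lines into blocks at the delimiter lines, turn each block into a dict by comprehension, then filter out empty records.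
import Mathlib
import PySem

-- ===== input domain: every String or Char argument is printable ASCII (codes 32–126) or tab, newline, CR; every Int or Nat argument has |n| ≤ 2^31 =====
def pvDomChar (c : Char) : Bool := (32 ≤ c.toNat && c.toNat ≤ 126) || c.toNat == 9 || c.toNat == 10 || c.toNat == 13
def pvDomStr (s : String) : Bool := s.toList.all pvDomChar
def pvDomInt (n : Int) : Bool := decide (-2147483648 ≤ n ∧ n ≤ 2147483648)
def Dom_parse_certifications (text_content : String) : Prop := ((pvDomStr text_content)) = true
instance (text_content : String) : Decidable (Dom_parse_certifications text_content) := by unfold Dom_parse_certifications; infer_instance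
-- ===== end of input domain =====

-- B replaces A's single interleaved loop (flush-on-'Record' mutable state) by a three-phase
-- pipeline: partition into blocks, build one dict per block, filter empty records (alternative decomposition, same cost).

-- ===== PORT A =====
-- text.split('\n') with a non-empty separator always succeeds, so .getD [] is never taken
def parse_certifications (text_content : String) : List (List (String × String)) :=
  let res := ((PySem.Str.split? text_content "\n").getD []).foldl
    (fun (st : List (List (String × String)) × PySem.Dict String String) line =>
      if PySem.Str.startswith line "Record" then
        (if st.2.items = [] then st else (st.1 ++ [st.2.items], PySem.Dict.empty))
      else if PySem.Str.isIn ":" line then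
        match PySem.Str.splitMax? line ":" 1 with
        | some (key :: value :: _) =>
            (st.1, st.2.insert (PySem.Str.strip key) (PySem.Str.strip value))
        | _ => st   -- unreachable: split(':',1) with ':' in line yields exactly two parts
      else st)
    ([], PySem.Dict.empty)
  if res.2.items = [] then res.1 else res.1 ++ [res.2.items]

-- ===== PORT B =====
-- dict comprehension over the colon-lines of one block (last value wins), returned as items
def pvRecordOf (block : List String) : List (String × String) :=
  (block.foldl
    (fun (d : PySem.Dict String String) l =>
      if PySem.Str.isIn ":" l then
        match (PySem.Str.splitMax? l ":" 1).getD [] with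
        | k :: v :: _ => d.insert (PySem.Str.strip k) (PySem.Str.strip v)
        | [_] => d   -- unreachable, as above
        | [] => d    -- unreachable, as above
      else d)
    PySem.Dict.empty).items

def parse_certifications_alt (text_content : String) : List (List (String × String)) :=
  let st := ((PySem.Str.split? text_content "\n").getD []).foldl
    (fun (st : List (List String) × List String) line =>
      if PySem.Str.startswith line "Record" then (st.1 ++ [st.2], [])
      else (st.1, st.2 ++ [line]))
    ([], [])
  let records := (st.1 ++ [st.2]).map pvRecordOf
  records.filter (fun r => !r.isEmpty)

-- ===== PRECONDITION & SPEC =====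
def Spec_parse_certifications (text_content : String) (out : List (List (String × String))) : Prop := out = parse_certifications_alt text_content
instance (text_content : String) (out : List (List (String × String))) : Decidable (Spec_parse_certifications text_content out) := by unfold Spec_parse_certifications; infer_instance

-- ===== CLAIM (what is proved, stated in full; the proofs are below) =====
def Claim_equal_parse_certifications : Prop := ∀ (text_content : String), Dom_parse_certifications text_content → Spec_parse_certifications text_content (parse_certifications text_content)

-- ===== LEMMAS AND PROOFS =====

-- the per-line dict update both loops perform on a non-'Record' line
def pvStep (d : PySem.Dict String String) (l : String) : PySem.Dict String String :=
  if PySem.Str.isIn ":" l then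
    match (PySem.Str.splitMax? l ":" 1).getD [] with
    | k :: v :: _ => d.insert (PySem.Str.strip k) (PySem.Str.strip v)
    | [_] => d
    | [] => d
  else d

-- A's loop body, named
def pvStepA (st : List (List (String × String)) × PySem.Dict String String) (line : String) :
    List (List (String × String)) × PySem.Dict String String :=
  if PySem.Str.startswith line "Record" then
    (if st.2.items = [] then st else (st.1 ++ [st.2.items], PySem.Dict.empty))
  else if PySem.Str.isIn ":" line then
    match PySem.Str.splitMax? line ":" 1 with
    | some (key :: value :: _) =>
        (st.1, st.2.insert (PySem.Str.strip key) (PySem.Str.strip value))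
    | _ => st
  else st

-- B's partitioning loop body, named
def pvStepB (st : List (List String) × List String) (line : String) :
    List (List String) × List String :=
  if PySem.Str.startswith line "Record" then (st.1 ++ [st.2], [])
  else (st.1, st.2 ++ [line])

def pvEmit (d : PySem.Dict String String) : List (List (String × String)) :=
  if d.items = [] then [] else [d.items]

-- reference recursion: the remaining output, given the current record d and the remaining lines
def pvRes (d : PySem.Dict String String) : List String → List (List (String × String))
  | [] => pvEmit d
  | l :: ls =>
    if PySem.Str.startswith l "Record" then pvEmit d ++ pvRes PySem.Dict.empty ls
    else pvRes (pvStep d l) ls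

lemma pvStepA_of_not_record {l : String} (h : ¬ PySem.Str.startswith l "Record" = true)
    (st : List (List (String × String)) × PySem.Dict String String) :
    pvStepA st l = (st.1, pvStep st.2 l) := by
  unfold pvStepA pvStep
  rw [if_neg h]
  by_cases hc : PySem.Str.isIn ":" l = true
  · rw [if_pos hc, if_pos hc]
    rcases hs : PySem.Str.splitMax? l ":" 1 with _ | ⟨_ | ⟨k, _ | ⟨v, rest⟩⟩⟩ <;> simp
  · rw [if_neg hc, if_neg hc]

lemma pvRecordOf_eq (block : List String) :
    pvRecordOf block = (block.foldl pvStep PySem.Dict.empty).items := rfl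

lemma pvA_char (lines : List String) :
    ∀ (certs : List (List (String × String))) (d : PySem.Dict String String),
    (if (lines.foldl pvStepA (certs, d)).2.items = [] then (lines.foldl pvStepA (certs, d)).1
     else (lines.foldl pvStepA (certs, d)).1 ++ [(lines.foldl pvStepA (certs, d)).2.items])
    = certs ++ pvRes d lines := by
  induction lines with
  | nil =>
    intro certs d
    simp only [List.foldl_nil, pvRes, pvEmit]
    split <;> simp
  | cons l ls ih =>
    intro certs d
    simp only [List.foldl_cons, pvRes]
    by_cases hrec : PySem.Str.startswith l "Record" = true
    · rw [if_pos hrec,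
        show pvStepA (certs, d) l
          = (if d.items = [] then (certs, d) else (certs ++ [d.items], PySem.Dict.empty)) by
        unfold pvStepA; rw [if_pos hrec]]
      by_cases hd : d.items = []
      · have hde : d = PySem.Dict.empty := by
          apply PySem.Dict.ext; simpa using hd
        subst hde
        rw [if_pos hd, ih certs PySem.Dict.empty]
        all_goals first
          | exact hd
          | simp [pvEmit, hd]
      · rw [if_neg hd, ih (certs ++ [d.items]) PySem.Dict.empty]
        simp [pvEmit, hd]
    · rw [if_neg hrec, pvStepA_of_not_record hrec, ih certs (pvStep d l)]

lemma pvEmit_eq_filter (d : PySem.Dict String String) :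
    List.filter (fun r => !r.isEmpty) [d.items] = pvEmit d := by
  unfold pvEmit
  by_cases hd : d.items = []
  · simp [hd]
  · have h2 : d.items.isEmpty = false := List.isEmpty_eq_false_iff.mpr hd
    simp [List.filter, h2, hd]

lemma pvB_char (lines : List String) :
    ∀ (bs : List (List String)) (cb : List String),
    (((lines.foldl pvStepB (bs, cb)).1 ++ [(lines.foldl pvStepB (bs, cb)).2]).map
        pvRecordOf).filter (fun r => !r.isEmpty)
    = ((bs.map pvRecordOf).filter (fun r => !r.isEmpty))
      ++ pvRes (cb.foldl pvStep PySem.Dict.empty) lines := by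
  induction lines with
  | nil =>
    intro bs cb
    simp only [List.foldl_nil, pvRes, List.map_append, List.map_cons, List.map_nil,
      List.filter_append, pvRecordOf_eq]
    rw [pvEmit_eq_filter]
  | cons l ls ih =>
    intro bs cb
    simp only [List.foldl_cons, pvRes]
    by_cases hrec : PySem.Str.startswith l "Record" = true
    · rw [if_pos hrec,
        show pvStepB (bs, cb) l = (bs ++ [cb], []) by unfold pvStepB; rw [if_pos hrec],
        ih (bs ++ [cb]) []]
      simp only [List.map_append, List.map_cons, List.map_nil, List.filter_append,
        List.foldl_nil, pvRecordOf_eq, List.append_assoc]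
      rw [pvEmit_eq_filter]
    · rw [if_neg hrec,
        show pvStepB (bs, cb) l = (bs, cb ++ [l]) by unfold pvStepB; rw [if_neg hrec],
        ih bs (cb ++ [l])]
      simp [pvStep]

theorem parse_certifications_spec : Claim_equal_parse_certifications := by
  intro text _
  unfold Spec_parse_certifications parse_certifications parse_certifications_alt
  show (if _ = _ then _ else _) = _
  rw [show ∀ (lines : List String) (init : List (List (String × String)) × PySem.Dict String String),
        lines.foldl (fun st line =>
          if PySem.Str.startswith line "Record" then
            (if st.2.items = [] then st else (st.1 ++ [st.2.items], PySem.Dict.empty))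
          else if PySem.Str.isIn ":" line then
            match PySem.Str.splitMax? line ":" 1 with
            | some (key :: value :: _) =>
                (st.1, st.2.insert (PySem.Str.strip key) (PySem.Str.strip value))
            | _ => st
          else st) init = lines.foldl pvStepA init from fun _ _ => rfl]
  rw [pvA_char ((PySem.Str.split? text "\n").getD []) [] PySem.Dict.empty]
  rw [show ∀ (lines : List String) (init : List (List String) × List String),
        lines.foldl (fun st line =>
          if PySem.Str.startswith line "Record" then (st.1 ++ [st.2], [])
          else (st.1, st.2 ++ [line])) init = lines.foldl pvStepB init from fun _ _ => rfl]
  rw [pvB_char ((PySem.Str.split? text "\n").getD []) [] []]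
  rfl
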